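-- pv_equiv track=rewrite | github.com/mj426382/Lisp-interpreter | lisp_interpreter/operation.py | count_logical_list
-- ===== SOURCE A (Python) =====
-- def count_logical_list(operator, result, simplier_list):
--     if operator == 'and':
--         for element in simplier_list:
--             result = result and element
--     elif operator == 'or':
--         for element in simplier_list:
--             result = result or element
--     elif operator == 'not' and len(simplier_list) == 0:
--         result = not result
--     return result
-- ===== SOURCE B (Python) =====
-- def count_logical_list(operator, result, simplier_list):
--     # find-first scan: the value of a chained and/or is the first short-circuiting
--     # element of [result] + simplier_list, or the last element if none short-circuits
--     seq = [result] + list(simplier_list)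
--     if operator == 'and':
--         return next((x for x in seq if not x), seq[-1])
--     if operator == 'or':
--         return next((x for x in seq if x), seq[-1])
--     if operator == 'not' and len(simplier_list) == 0:
--         return not result
--     return result
-- ===== Notes on version B (the rewrite author's own statement) =====
-- stated objective: alternative
-- what changed: Replaces the accumulating fold with a find-first scan over the combined sequence [result]+simplier_list: for 'and' return the first falsy element (else the last), for 'or' the first truthy element (else the last), exploiting that chained and/or returns its short-circuit value.
import Mathlib
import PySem

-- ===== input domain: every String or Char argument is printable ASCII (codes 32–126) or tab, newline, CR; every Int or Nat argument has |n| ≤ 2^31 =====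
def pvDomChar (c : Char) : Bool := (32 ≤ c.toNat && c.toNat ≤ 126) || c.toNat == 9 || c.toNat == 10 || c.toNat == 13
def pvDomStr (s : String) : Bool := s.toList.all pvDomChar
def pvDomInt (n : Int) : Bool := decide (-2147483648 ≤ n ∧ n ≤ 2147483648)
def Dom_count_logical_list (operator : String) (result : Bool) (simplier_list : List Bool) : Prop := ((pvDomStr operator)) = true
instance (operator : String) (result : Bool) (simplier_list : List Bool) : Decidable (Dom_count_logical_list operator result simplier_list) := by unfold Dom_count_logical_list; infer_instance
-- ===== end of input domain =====

-- B replaces A's accumulating fold with a find-first scan over [result]+list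
-- (first short-circuiting element, else the last); alternative decomposition, same cost.
-- ===== PORT A =====
def count_logical_list (operator : String) (result : Bool) (simplier_list : List Bool) : Bool :=
  if operator == "and" then
    simplier_list.foldl (fun result element => result && element) result
  else if operator == "or" then
    simplier_list.foldl (fun result element => result || element) result
  else if operator == "not" && simplier_list.length == 0 then
    !result
  else
    result

-- ===== PORT B =====
def count_logical_list_alt (operator : String) (result : Bool) (simplier_list : List Bool) : Bool :=
  let seq := result :: simplier_list
  if operator == "and" then
    (seq.find? (fun x => !x)).getD ((PySem.List.pyGet? seq (-1)).getD false)
  else if operator == "or" then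
    (seq.find? (fun x => x)).getD ((PySem.List.pyGet? seq (-1)).getD false)
  else if operator == "not" && simplier_list.length == 0 then
    !result
  else
    result

-- ===== PRECONDITION & SPEC =====
def Spec_count_logical_list (operator : String) (result : Bool) (simplier_list : List Bool) (out : Bool) : Prop := out = count_logical_list_alt operator result simplier_list
instance (operator : String) (result : Bool) (simplier_list : List Bool) (out : Bool) : Decidable (Spec_count_logical_list operator result simplier_list out) := by unfold Spec_count_logical_list; infer_instance

-- ===== CLAIM (what is proved, stated in full; the proofs are below) =====
def Claim_equal_count_logical_list : Prop := ∀ (operator : String) (result : Bool) (simplier_list : List Bool), Dom_count_logical_list operator result simplier_list → Spec_count_logical_list operator result simplier_list (count_logical_list operator result simplier_list)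

-- ===== LEMMAS AND PROOFS =====
theorem pyGet_last (l : List Bool) (h : l ≠ []) :
    (PySem.List.pyGet? l (-1)).getD false = l.getLast h := by
  cases l with
  | nil => exact absurd rfl h
  | cons x xs =>
    simp [PySem.List.pyGet?, PySem.List.pyIdx?]
    have hlt : (x :: xs).length - 1 < (x :: xs).length := by simp
    simp [List.getLast_eq_getElem, List.getElem?_eq_getElem hlt]
    rfl

theorem find_and (l : List Bool) (h : l ≠ []) :
    ((l.find? (fun x => !x)).getD (l.getLast h)) = l.all id := by
  induction l with
  | nil => exact absurd rfl h
  | cons x xs ih =>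
    cases x with
    | false => simp [List.find?]
    | true =>
      cases xs with
      | nil => simp [List.find?]
      | cons y ys =>
        simp only [List.find?, List.all_cons, id]
        simpa [List.getLast_cons] using ih (by simp)

theorem find_or (l : List Bool) (h : l ≠ []) :
    ((l.find? (fun x => x)).getD (l.getLast h)) = l.any id := by
  induction l with
  | nil => exact absurd rfl h
  | cons x xs ih =>
    cases x with
    | true => simp [List.find?]
    | false =>
      cases xs with
      | nil => simp [List.find?]
      | cons y ys =>
        simp only [List.find?, List.any_cons, id]
        simpa [List.getLast_cons] using ih (by simp)

theorem foldl_and (l : List Bool) (r : Bool) :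
    l.foldl (fun result element => result && element) r = (r && l.all id) := by
  induction l generalizing r with
  | nil => simp
  | cons x xs ih => simp [List.foldl, ih, Bool.and_assoc]

theorem foldl_or (l : List Bool) (r : Bool) :
    l.foldl (fun result element => result || element) r = (r || l.any id) := by
  induction l generalizing r with
  | nil => simp
  | cons x xs ih => simp [List.foldl, ih, Bool.or_assoc]

-- ===== VERDICT (by name: the statement is the Claim_ definition above) =====
theorem count_logical_list_spec : Claim_equal_count_logical_list := by
  intro operator result simplier_list _
  unfold Spec_count_logical_list count_logical_list count_logical_list_alt
  have hne : (result :: simplier_list) ≠ [] := by simp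
  split_ifs <;>
    simp [pyGet_last _ hne, find_and _ hne, find_or _ hne, foldl_and, foldl_or]
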